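-- pv_equiv track=rewrite | github.com/seooh99/Algorithm | 백준/Silver/8979. 올림픽/올림픽.py | olympic_ranking
-- ===== SOURCE A (Python) =====
-- def olympic_ranking(n, k, medals):
--     target_country_medals = medals[k - 1]
--     rank = 1
--
--     for i in range(n):
--         if i == k - 1:  # target_country가 자기 자신인 경우
--             continue
--         if medals[i][0] > target_country_medals[0]:
--             rank += 1
--         elif medals[i][0] == target_country_medals[0]:
--             if medals[i][1] > target_country_medals[1]:
--                 rank += 1
--             elif medals[i][1] == target_country_medals[1]:
--                 if medals[i][2] > target_country_medals[2]:
--                     rank += 1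
--
--     return rank
-- ===== SOURCE B (Python) =====
-- def olympic_ranking(n, k, medals):
--     target = medals[k - 1]
--     ordered = sorted((medals[i] for i in range(n)), reverse=True)
--     rank = 1
--     for m in ordered:
--         if m <= target:
--             break
--         rank += 1
--     return rank
-- ===== Notes on version B (the rewrite author's own statement) =====
-- stated objective: alternative
-- what changed: Replaces A's single counting pass with nested per-component comparisons and a self-skip by a descending lexicographic sort of the first n rows followed by an early-exit scan that stops at the first row not above the target.
import Mathlib
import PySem

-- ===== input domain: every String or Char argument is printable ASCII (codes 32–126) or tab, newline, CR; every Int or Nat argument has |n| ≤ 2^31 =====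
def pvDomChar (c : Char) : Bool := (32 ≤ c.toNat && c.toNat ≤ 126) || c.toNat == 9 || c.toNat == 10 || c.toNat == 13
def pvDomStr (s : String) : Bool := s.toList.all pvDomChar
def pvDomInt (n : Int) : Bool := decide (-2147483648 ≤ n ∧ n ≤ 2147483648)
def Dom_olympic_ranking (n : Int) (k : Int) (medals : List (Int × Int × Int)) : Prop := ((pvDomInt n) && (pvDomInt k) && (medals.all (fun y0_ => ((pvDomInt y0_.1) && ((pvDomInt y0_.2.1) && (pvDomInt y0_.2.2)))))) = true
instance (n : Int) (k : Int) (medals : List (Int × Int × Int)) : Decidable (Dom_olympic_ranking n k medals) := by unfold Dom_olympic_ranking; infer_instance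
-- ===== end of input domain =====

-- B replaces A's counting pass with tuple nests by a descending sort followed by an
-- early-exit scan for the first row not above the target (objective: alternative).

-- ===== PORT A =====
def olympic_ranking (n : Int) (k : Int) (medals : List (Int × Int × Int)) : Int :=
  let target := (PySem.List.pyGet? medals (k - 1)).getD (0, 0, 0)
  (PySem.List.pyRange 0 n 1).foldl (fun rank i =>
    if i = k - 1 then rank
    else
      let m := (PySem.List.pyGet? medals i).getD (0, 0, 0)
      if m.1 > target.1 then rank + 1
      else if m.1 = target.1 then
        if m.2.1 > target.2.1 then rank + 1
        else if m.2.1 = target.2.1 then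
          if m.2.2 > target.2.2 then rank + 1 else rank
        else rank
      else rank) 1

-- ===== PORT B =====
-- Python's lexicographic order on 3-tuples, as a sort key (exact: tuple `<` is lex).
def pvLexKey (m : Int × Int × Int) : Lex (Int × Lex (Int × Int)) :=
  toLex (m.1, toLex (m.2.1, m.2.2))

-- the `for m in ordered: if m <= target: break; rank += 1` loop
def pvScanRank (target : Int × Int × Int) : List (Int × Int × Int) → Int
  | [] => 1
  | m :: rest => if pvLexKey m ≤ pvLexKey target then 1 else 1 + pvScanRank target rest

def olympic_ranking_alt (n : Int) (k : Int) (medals : List (Int × Int × Int)) : Int :=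
  let target := (PySem.List.pyGet? medals (k - 1)).getD (0, 0, 0)
  let ordered := PySem.List.sorted
    ((PySem.List.pyRange 0 n 1).map (fun i => (PySem.List.pyGet? medals i).getD (0, 0, 0)))
    pvLexKey true
  pvScanRank target ordered

-- ===== PRECONDITION & SPEC =====
-- exactly where Python A returns: medals[k-1] in range (IndexError otherwise) and
-- n ≤ len(medals) so every medals[i], i in range(n), is in range
def Pre_olympic_ranking (n : Int) (k : Int) (medals : List (Int × Int × Int)) : Prop :=
  PySem.Raise.InRange medals.length (k - 1) ∧ n ≤ (medals.length : Int)
instance (n : Int) (k : Int) (medals : List (Int × Int × Int)) : Decidable (Pre_olympic_ranking n k medals) := by unfold Pre_olympic_ranking; infer_instance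

def pvWitness_olympic_ranking : Int × Int × (List (Int × Int × Int)) := (2, 1, [(1, 2, 3), (0, 1, 0)])

def Spec_olympic_ranking (n : Int) (k : Int) (medals : List (Int × Int × Int)) (out : Int) : Prop := out = olympic_ranking_alt n k medals
instance (n : Int) (k : Int) (medals : List (Int × Int × Int)) (out : Int) : Decidable (Spec_olympic_ranking n k medals out) := by unfold Spec_olympic_ranking; infer_instance

-- ===== CLAIM (what is proved, stated in full; the proofs are below) =====
def Claim_equal_olympic_ranking : Prop := ∀ (n : Int) (k : Int) (medals : List (Int × Int × Int)), Dom_olympic_ranking n k medals → Pre_olympic_ranking n k medals → Spec_olympic_ranking n k medals (olympic_ranking n k medals)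

-- ===== LEMMAS AND PROOFS =====

-- A's nested medal comparison is exactly strict lexicographic `target < m`
lemma pvStep_eq (t m : Int × Int × Int) (rank : Int) :
    (if m.1 > t.1 then rank + 1
     else if m.1 = t.1 then
       if m.2.1 > t.2.1 then rank + 1
       else if m.2.1 = t.2.1 then
         if m.2.2 > t.2.2 then rank + 1 else rank
       else rank
     else rank)
    = if pvLexKey t < pvLexKey m then rank + 1 else rank := by
  simp only [pvLexKey, Prod.Lex.lt_iff, ofLex_toLex]
  split_ifs <;> first | rfl | omega

-- the early-exit scan of a descending list counts all elements above the target
lemma pvScanRank_eq_countP (t : Int × Int × Int) (l : List (Int × Int × Int))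
    (h : l.Pairwise (fun a b => pvLexKey b ≤ pvLexKey a)) :
    pvScanRank t l = 1 + (l.countP (fun m => decide (pvLexKey t < pvLexKey m)) : Int) := by
  induction l with
  | nil => simp [pvScanRank]
  | cons m rest ih =>
    rcases List.pairwise_cons.mp h with ⟨h1, h2⟩
    by_cases hm : pvLexKey m ≤ pvLexKey t
    · have hz : rest.countP (fun x => decide (pvLexKey t < pvLexKey x)) = 0 := by
        apply List.countP_eq_zero.mpr
        intro b hb
        simp only [decide_eq_true_eq, not_lt]
        exact le_trans (h1 b hb) hm
      simp [pvScanRank, hm, hz, not_lt_of_ge hm]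
    · have hlt : pvLexKey t < pvLexKey m := lt_of_not_ge hm
      simp only [pvScanRank, if_neg hm, ih h2, List.countP_cons, hlt, decide_true]
      push_cast
      ring

theorem olympic_ranking_spec : Claim_equal_olympic_ranking := by
  intro n k medals _ _
  simp only [Spec_olympic_ranking, olympic_ranking, olympic_ranking_alt]
  set t := (PySem.List.pyGet? medals (k - 1)).getD (0, 0, 0) with ht
  set items := (PySem.List.pyRange 0 n 1).map (fun i => (PySem.List.pyGet? medals i).getD (0, 0, 0)) with hitems
  -- A's loop body, rewritten pointwise to a pure 0/1 count
  have hbody :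
      (fun (rank : Int) (i : Int) =>
        if i = k - 1 then rank
        else
          let m := (PySem.List.pyGet? medals i).getD (0, 0, 0)
          if m.1 > t.1 then rank + 1
          else if m.1 = t.1 then
            if m.2.1 > t.2.1 then rank + 1
            else if m.2.1 = t.2.1 then
              if m.2.2 > t.2.2 then rank + 1 else rank
            else rank
          else rank)
      = (fun (rank : Int) (i : Int) =>
          if (fun i => decide (pvLexKey t < pvLexKey ((PySem.List.pyGet? medals i).getD (0, 0, 0)))) i
          then rank + 1 else rank) := by
    funext rank i
    by_cases hik : i = k - 1
    · subst hik
      simp [← ht]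
    · simp only [if_neg hik, pvStep_eq, decide_eq_true_eq]
  rw [hbody, PySem.List.foldl_count_if]
  -- B's side: the scan of the descending sort counts the same elements
  rw [pvScanRank_eq_countP t _ (PySem.List.sorted_pairwise_rev items pvLexKey)]
  rw [(PySem.List.sorted_perm items pvLexKey true).countP_eq]
  rw [hitems, List.countP_map]
  rfl

-- ===== VERDICT (by name: the statement is the Claim_ definition above) =====
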